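-- pv_equiv track=rewrite | github.com/Programming641/computer_vision_algorithm3 | algorithms/scnd_stage/verify_shapes_by_image_template.py | is_every_shape_close
-- ===== SOURCE A (Python) =====
-- def is_every_shape_close( shapes_vicinity_pixels ):
--
--    if len( shapes_vicinity_pixels ) > 1:
--       skip = False
--       close_together_shapes = []
--       for shape_num, vicinity_pixels in enumerate(shapes_vicinity_pixels):
--          pixel_found = False
--
--          for ano_shape_num, ano_vicinity_pixels in enumerate(shapes_vicinity_pixels):
--             if vicinity_pixels == ano_vicinity_pixels:
--                continue
--
--             if [ ano_shape_num, shape_num ] in close_together_shapes: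
--                pixel_found = True
--                break
--
--             for pixel in vicinity_pixels:
--                if pixel in ano_vicinity_pixels:
--                   pixel_found = True
--                   close_together_shapes.append( [ shape_num, ano_shape_num ] )
--                   break
--
--             if pixel_found is True:
--                break
--
--          if pixel_found is False:
--             skip = True
--
--       if skip is True:
--          return False
--       elif skip is False:
--          return True
--
--
--    elif len( shapes_vicinity_pixels ) == 1:
--       return True
-- ===== SOURCE B (Python) =====
-- def is_every_shape_close(shapes_vicinity_pixels):
--     n = len(shapes_vicinity_pixels)
--     if n == 0:
--         return None
--     if n == 1:
--         return True
--     # Inverted index: pixel -> set of (distinct-valued) shapes containing it.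
--     index = {}
--     for vic in shapes_vicinity_pixels:
--         key = tuple(map(tuple, vic))
--         for p in vic:
--             index.setdefault(tuple(p), set()).add(key)
--     # A shape is close iff one of its pixels also belongs to a shape with a
--     # different pixel list.
--     for vic in shapes_vicinity_pixels:
--         key = tuple(map(tuple, vic))
--         if not any(any(k != key for k in index[tuple(p)]) for p in vic):
--             return False
--     return True
-- ===== Notes on version B (the rewrite author's own statement) =====
-- stated objective: alternative
-- what changed: Replaces the pairwise shape-vs-shape pixel scans with a memo list by a one-pass inverted index from pixel to the set of shapes containing it, then checks each shape with direct index lookups.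
import Mathlib
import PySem

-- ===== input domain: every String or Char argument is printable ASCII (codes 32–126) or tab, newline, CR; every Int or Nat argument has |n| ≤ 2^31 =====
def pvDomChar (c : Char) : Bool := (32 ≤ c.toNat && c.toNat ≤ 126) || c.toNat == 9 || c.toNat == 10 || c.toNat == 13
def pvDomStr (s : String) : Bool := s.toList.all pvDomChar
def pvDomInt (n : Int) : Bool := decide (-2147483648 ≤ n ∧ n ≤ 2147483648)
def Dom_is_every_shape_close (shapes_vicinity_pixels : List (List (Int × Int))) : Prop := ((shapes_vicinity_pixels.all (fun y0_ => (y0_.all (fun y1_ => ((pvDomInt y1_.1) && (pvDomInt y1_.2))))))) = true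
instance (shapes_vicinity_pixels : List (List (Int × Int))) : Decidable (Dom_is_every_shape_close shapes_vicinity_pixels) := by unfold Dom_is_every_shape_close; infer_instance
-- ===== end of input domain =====

-- B replaces A's pairwise shape-vs-shape pixel scans (with a memo list) by a pixel -> shapes inverted index built in one pass (alternative algorithm).

-- ===== PORT A =====
-- 'for pixel in vicinity_pixels: if pixel in ano_vicinity_pixels: … break'
def pvPixScan (v w : List (Int × Int)) : Bool :=
  match v with
  | [] => false
  | p :: rest => if p ∈ w then true else pvPixScan rest w

-- inner 'for ano_shape_num, ano_vicinity_pixels in enumerate(...)' with break;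
-- returns (pixel_found, close_together_shapes)
def pvInner (i : Int) (v : List (Int × Int)) (pairs : List (Int × List (Int × Int)))
    (memo : List (Int × Int)) : Bool × List (Int × Int) :=
  match pairs with
  | [] => (false, memo)
  | (j, w) :: rest =>
    if v = w then pvInner i v rest memo
    else if (j, i) ∈ memo then (true, memo)
    else if pvPixScan v w then (true, memo ++ [(i, j)])
    else pvInner i v rest memo

-- outer 'for shape_num, vicinity_pixels in enumerate(...)', threading skip and the memo
def pvOuter (allPairs : List (Int × List (Int × Int))) :
    List (Int × List (Int × Int)) → Bool → List (Int × Int) → Bool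
  | [], skip, _ => skip
  | (i, v) :: rest, skip, memo =>
    let r := pvInner i v allPairs memo
    pvOuter allPairs rest (if r.1 then skip else true) r.2

def is_every_shape_close (shapes_vicinity_pixels : List (List (Int × Int))) : Option Bool :=
  if shapes_vicinity_pixels.length > 1 then
    let pairs := PySem.List.enumerate shapes_vicinity_pixels 0
    let skip := pvOuter pairs pairs false []
    if skip then some false else some true
  else if shapes_vicinity_pixels.length = 1 then some true
  else none

-- ===== PORT B =====
-- 'index.setdefault(tuple(p), set()).add(key)' for every pixel of every shape
def pvBuildIndex (ls : List (List (Int × Int))) :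
    PySem.Dict (Int × Int) (PySem.Set (List (Int × Int))) :=
  ls.foldl (fun d vic =>
    vic.foldl (fun d p => d.modify p [] (fun s => PySem.Set.add s vic)) d)
    PySem.Dict.empty

-- second loop: 'for vic in …: if not any(any(k != key …)): return False' then 'return True'
-- (index[tuple(p)] always exists, since the index was built from these very pixels;
--  getD [] is value-exact there)
def pvCheck (index : PySem.Dict (Int × Int) (PySem.Set (List (Int × Int)))) :
    List (List (Int × Int)) → Option Bool
  | [] => some true
  | vic :: rest =>
    if vic.any (fun p => (index.getD p []).any (fun k => k ≠ vic)) then pvCheck index rest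
    else some false

def is_every_shape_close_alt (shapes_vicinity_pixels : List (List (Int × Int))) : Option Bool :=
  if shapes_vicinity_pixels.length = 0 then none
  else if shapes_vicinity_pixels.length = 1 then some true
  else pvCheck (pvBuildIndex shapes_vicinity_pixels) shapes_vicinity_pixels

-- ===== PRECONDITION & SPEC =====
def Spec_is_every_shape_close (shapes_vicinity_pixels : List (List (Int × Int))) (out : Option Bool) : Prop := out = is_every_shape_close_alt shapes_vicinity_pixels
instance (shapes_vicinity_pixels : List (List (Int × Int))) (out : Option Bool) : Decidable (Spec_is_every_shape_close shapes_vicinity_pixels out) := by unfold Spec_is_every_shape_close; infer_instance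

-- ===== CLAIM (what is proved, stated in full; the proofs are below) =====
def Claim_equal_is_every_shape_close : Prop := ∀ (shapes_vicinity_pixels : List (List (Int × Int))), Dom_is_every_shape_close shapes_vicinity_pixels → Spec_is_every_shape_close shapes_vicinity_pixels (is_every_shape_close shapes_vicinity_pixels)

-- ===== LEMMAS AND PROOFS =====

-- the common specification: shape v has a pixel shared with a shape of different value
def pvClose (ls : List (List (Int × Int))) (v : List (Int × Int)) : Bool :=
  ls.any (fun w => decide (w ≠ v) && v.any (fun p => decide (p ∈ w)))

theorem pvPixScan_eq (v w : List (Int × Int)) :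
    pvPixScan v w = v.any (fun p => decide (p ∈ w)) := by
  induction v with
  | nil => rfl
  | cons p rest ih => by_cases h : p ∈ w <;> simp [pvPixScan, h, ih]

theorem pvAny_enumerate_snd {α : Type} (xs : List α) (s : Int) (f : α → Bool) :
    (PySem.List.enumerate xs s).any (fun q => f q.2) = xs.any f := by
  induction xs generalizing s with
  | nil => rfl
  | cons x rest ih => simp only [PySem.List.enumerate_cons, List.any_cons, ih]

-- memo soundness invariant
def pvGood (ls : List (List (Int × Int))) (memo : List (Int × Int)) : Prop :=
  ∀ a b, (a, b) ∈ memo →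
    ∃ va vb, (a, va) ∈ PySem.List.enumerate ls 0 ∧ (b, vb) ∈ PySem.List.enumerate ls 0 ∧
      va ≠ vb ∧ ∃ p, p ∈ va ∧ p ∈ vb

theorem pvEnum_unique (ls : List (List (Int × Int))) {i : Int} {x y : List (Int × Int)}
    (hx : (i, x) ∈ PySem.List.enumerate ls 0) (hy : (i, y) ∈ PySem.List.enumerate ls 0) :
    x = y := by
  rw [PySem.List.mem_enumerate_iff] at hx hy
  obtain ⟨k, hk, hkx⟩ := hx
  obtain ⟨m, hm, hmy⟩ := hy
  have : k = m := by
    have h1 : i = (k : Int) := by simpa using congrArg Prod.fst hkx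
    have h2 : i = (m : Int) := by simpa using congrArg Prod.fst hmy
    omega
  subst this
  have := (congrArg Prod.snd hkx).trans (congrArg Prod.snd hmy).symm
  simpa using this

theorem pvInner_spec (ls : List (List (Int × Int))) (i : Int) (v : List (Int × Int))
    (pairs : List (Int × List (Int × Int))) (memo : List (Int × Int))
    (hv : (i, v) ∈ PySem.List.enumerate ls 0)
    (hsub : ∀ q ∈ pairs, q ∈ PySem.List.enumerate ls 0)
    (hg : pvGood ls memo) :
    (pvInner i v pairs memo).1
      = pairs.any (fun q => decide (q.2 ≠ v) && pvPixScan v q.2)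
    ∧ pvGood ls (pvInner i v pairs memo).2 := by
  induction pairs with
  | nil => exact ⟨rfl, hg⟩
  | cons q rest ih =>
    obtain ⟨j, w⟩ := q
    have hqmem : (j, w) ∈ PySem.List.enumerate ls 0 := hsub _ (by simp)
    have hsub' : ∀ q ∈ rest, q ∈ PySem.List.enumerate ls 0 := fun q hq => hsub _ (by simp [hq])
    by_cases hvw : v = w
    · have := ih hsub'
      simpa [pvInner, hvw, pvPixScan_eq] using this
    · by_cases hm : (j, i) ∈ memo
      · -- memo shortcut; the invariant yields the head of the any
        obtain ⟨vj, vi, hvj, hvi, hne, p, hpj, hpi⟩ := hg _ _ hm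
        have hvi' : vi = v := pvEnum_unique ls hvi hv
        have hvj' : vj = w := pvEnum_unique ls hvj hqmem
        rw [hvi'] at hpi
        rw [hvj'] at hpj
        constructor
        · simp [pvInner, hvw, hm, List.any_cons]
          exact Or.inl ⟨fun hh => hvw hh.symm,
            by rw [pvPixScan_eq]; exact List.any_eq_true.2 ⟨p, hpi, by simp [hpj]⟩⟩
        · simpa [pvInner, hvw, hm] using hg
      · by_cases hscan : pvPixScan v w
        · have h1 : (decide (w ≠ v) && pvPixScan v w) = true := by
            simp [hscan]; exact fun h => hvw h.symm
          constructor
          · simp [pvInner, hvw, hm, hscan, List.any_cons]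
            exact Or.inl (fun hh => hvw hh.symm)
          · simp only [pvInner, if_neg hvw, if_neg hm, if_pos hscan]
            intro a b hab
            rcases List.mem_append.1 hab with h | h
            · exact hg _ _ h
            · simp at h
              obtain ⟨ha, hb⟩ := h; subst ha; subst hb
              rw [pvPixScan_eq] at hscan
              obtain ⟨p, hpv, hpw⟩ := List.any_eq_true.1 hscan
              exact ⟨v, w, hv, hqmem, hvw, p, hpv, by simpa using hpw⟩
        · have hstep : pvInner i v ((j, w) :: rest) memo = pvInner i v rest memo := by
            simp [pvInner, hvw, hm, hscan]
          have := ih hsub'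
          refine ⟨?_, by rw [hstep]; exact this.2⟩
          rw [hstep, this.1]
          simp [List.any_cons, hscan]

theorem pvFound_eq_close (ls : List (List (Int × Int))) (v : List (Int × Int)) :
    (PySem.List.enumerate ls 0).any (fun q => decide (q.2 ≠ v) && pvPixScan v q.2)
      = pvClose ls v := by
  rw [pvAny_enumerate_snd ls 0 (fun w => decide (w ≠ v) && pvPixScan v w)]
  unfold pvClose
  simp only [pvPixScan_eq]

theorem pvOuter_spec (ls : List (List (Int × Int)))
    (rest : List (Int × List (Int × Int))) (skip : Bool) (memo : List (Int × Int))
    (hsub : ∀ q ∈ rest, q ∈ PySem.List.enumerate ls 0)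
    (hg : pvGood ls memo) :
    pvOuter (PySem.List.enumerate ls 0) rest skip memo
      = (skip || rest.any (fun q => ! pvClose ls q.2)) := by
  induction rest generalizing skip memo with
  | nil => simp [pvOuter]
  | cons q rest ih =>
    obtain ⟨i, v⟩ := q
    have hv : (i, v) ∈ PySem.List.enumerate ls 0 := hsub _ (by simp)
    have hsub' : ∀ q ∈ rest, q ∈ PySem.List.enumerate ls 0 := fun q hq => hsub _ (by simp [hq])
    have hin := pvInner_spec ls i v (PySem.List.enumerate ls 0) memo hv (fun q hq => hq) hg
    show pvOuter _ _ _ _ = _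
    rw [pvOuter, ih _ _ hsub' hin.2, hin.1, pvFound_eq_close]
    cases h : pvClose ls v <;> simp [h, List.any_cons]

-- A computes some (all shapes close) when the list has at least two shapes
theorem pvA_eq (ls : List (List (Int × Int))) (h : ls.length > 1) :
    is_every_shape_close ls = some (ls.all (pvClose ls)) := by
  have hg : pvGood ls [] := by intro a b hab; simp at hab
  have hout := pvOuter_spec ls (PySem.List.enumerate ls 0) false [] (fun q hq => hq) hg
  unfold is_every_shape_close
  rw [if_pos h]
  show (if pvOuter (PySem.List.enumerate ls 0) (PySem.List.enumerate ls 0) false [] = true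
        then some false else some true) = _
  rw [hout, pvAny_enumerate_snd ls 0 (fun v => ! pvClose ls v), List.all_eq_not_any_not]
  cases ls.any (fun v => ! pvClose ls v) <;> simp

-- B-side: membership after adding one shape for all its pixels
theorem pvInnerFold_mem (ps kv : List (Int × Int))
    (d : PySem.Dict (Int × Int) (PySem.Set (List (Int × Int))))
    (q : Int × Int) (k : List (Int × Int)) :
    (k ∈ (ps.foldl (fun d p => d.modify p [] (fun s => PySem.Set.add s kv)) d).getD q []
      ↔ k ∈ d.getD q [] ∨ (q ∈ ps ∧ k = kv)) := by
  induction ps generalizing d with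
  | nil => simp
  | cons p rest ih =>
    rw [List.foldl_cons, ih]
    rw [PySem.Dict.getD_modify]
    by_cases hq : q = p
    · subst hq
      simp [PySem.Set.mem_add]
      tauto
    · simp only [if_neg hq, List.mem_cons]
      tauto

-- membership in the fully built index: exactly the shapes containing the pixel
theorem pvBuildIndex_mem (ls : List (List (Int × Int))) (q : Int × Int) (k : List (Int × Int)) :
    (k ∈ (pvBuildIndex ls).getD q [] ↔ k ∈ ls ∧ q ∈ k) := by
  unfold pvBuildIndex
  have main : ∀ (d : PySem.Dict (Int × Int) (PySem.Set (List (Int × Int)))),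
      k ∈ (ls.foldl (fun d vic =>
            vic.foldl (fun d p => d.modify p [] (fun s => PySem.Set.add s vic)) d) d).getD q []
        ↔ k ∈ d.getD q [] ∨ (k ∈ ls ∧ q ∈ k) := by
    induction ls with
    | nil => simp
    | cons vic rest ih =>
      intro d
      rw [List.foldl_cons, ih, pvInnerFold_mem]
      constructor
      · rintro ((h | ⟨hq, hk⟩) | ⟨hk, hq⟩)
        · exact Or.inl h
        · subst hk; exact Or.inr ⟨by simp, hq⟩
        · exact Or.inr ⟨by simp [hk], hq⟩
      · rintro (h | ⟨hk, hq⟩)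
        · exact Or.inl (Or.inl h)
        · rcases List.mem_cons.1 hk with hk | hk
          · subst hk; exact Or.inl (Or.inr ⟨hq, rfl⟩)
          · exact Or.inr ⟨hk, hq⟩
  rw [main PySem.Dict.empty]
  simp [PySem.Dict.getD_empty]

-- B's per-shape test agrees with the specification
theorem pvOk_eq_close (ls : List (List (Int × Int))) (vic : List (Int × Int)) :
    vic.any (fun p => ((pvBuildIndex ls).getD p []).any (fun k => k ≠ vic)) = pvClose ls vic := by
  rw [Bool.eq_iff_iff]
  simp only [List.any_eq_true, pvClose, decide_eq_true_eq, Bool.and_eq_true, ne_eq]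
  constructor
  · rintro ⟨p, hp, k, hk, hne⟩
    have := (pvBuildIndex_mem ls p k).1 hk
    exact ⟨k, this.1, by simpa using hne, p, hp, this.2⟩
  · rintro ⟨w, hw, hne, p, hp, hpw⟩
    exact ⟨p, hp, w, (pvBuildIndex_mem ls p w).2 ⟨hw, hpw⟩, by simpa using hne⟩

theorem pvCheck_eq (ls ls' : List (List (Int × Int))) :
    pvCheck (pvBuildIndex ls) ls' = some (ls'.all (pvClose ls)) := by
  induction ls' with
  | nil => rfl
  | cons vic rest ih =>
    rw [pvCheck, pvOk_eq_close]
    cases h : pvClose ls vic <;> simp [h, ih]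

theorem pvB_eq (ls : List (List (Int × Int))) (h : ls.length > 1) :
    is_every_shape_close_alt ls = some (ls.all (pvClose ls)) := by
  unfold is_every_shape_close_alt
  rw [if_neg (by omega), if_neg (by omega), pvCheck_eq]

-- ===== VERDICT (by name: the statement is the Claim_ definition above) =====
theorem is_every_shape_close_spec : Claim_equal_is_every_shape_close := by
  intro ls _
  unfold Spec_is_every_shape_close
  match ls with
  | [] => rfl
  | [v] => rfl
  | v :: w :: rest =>
    have h : (v :: w :: rest).length > 1 := by simp
    rw [pvA_eq _ h, pvB_eq _ h]
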